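-- pv_equiv track=rewrite | github.com/Accenture/MethodAtlas | methodatlas-docs/src/docs/mkdocs_to_pandoc.py | indentation_width
-- ===== SOURCE A (Python) =====
-- def indentation_width(text: str) -> int:
--     width = 0
--     for char in text:
--         if char == " ":
--             width += 1
--         elif char == "\t":
--             width += 4
--         else:
--             break
--     return width
-- ===== SOURCE B (Python) =====
-- def indentation_width(text: str) -> int:
--     prefix = text[:len(text) - len(text.lstrip(" \t"))]
--     return prefix.count(" ") + 4 * prefix.count("\t")
-- ===== Notes on version B (the rewrite author's own statement) =====
-- stated objective: simpler
-- what changed: Replaces the fused accumulate-and-break character loop with extracting the leading whitespace prefix via lstrip slicing and then two separate count passes over it.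
import Mathlib
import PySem

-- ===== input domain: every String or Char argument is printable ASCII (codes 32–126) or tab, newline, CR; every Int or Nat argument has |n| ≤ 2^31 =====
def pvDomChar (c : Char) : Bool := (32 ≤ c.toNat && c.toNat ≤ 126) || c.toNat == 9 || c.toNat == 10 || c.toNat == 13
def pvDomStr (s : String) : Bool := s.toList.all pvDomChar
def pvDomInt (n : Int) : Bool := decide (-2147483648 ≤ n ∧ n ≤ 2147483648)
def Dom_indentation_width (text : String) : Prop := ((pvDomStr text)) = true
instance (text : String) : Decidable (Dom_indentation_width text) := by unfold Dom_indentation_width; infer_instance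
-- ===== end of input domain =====

-- B computes the leading whitespace prefix (via lstrip-style slicing) and counts spaces and tabs
-- in two separate passes, instead of A's fused accumulate-and-break loop: simpler decomposition.


-- ===== PORT A =====
-- A's for-loop with break, transcribed as structural recursion over the characters:
-- add 1 for ' ', 4 for '\t', stop at the first other character.
def widthLoopA : List Char → Int
  | [] => 0
  | c :: cs => if c = ' ' then 1 + widthLoopA cs
               else if c = '\t' then 4 + widthLoopA cs
               else 0

def indentation_width (text : String) : Int := widthLoopA text.toList

-- ===== PORT B =====
-- prefix = text[:len(text) - len(text.lstrip(" \t"))]; return prefix.count(" ") + 4*prefix.count("\t")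
def indentation_width_alt (text : String) : Int :=
  let cs := text.toList
  let stripped := cs.dropWhile (fun c => c = ' ' ∨ c = '\t')   -- text.lstrip(" \t")
  let pfx := cs.take (cs.length - stripped.length)             -- the slice text[:len-len(stripped)]
  (pfx.count ' ' : Int) + 4 * (pfx.count '\t' : Int)

-- ===== PRECONDITION & SPEC =====
def Spec_indentation_width (text : String) (out : Int) : Prop := out = indentation_width_alt text
instance (text : String) (out : Int) : Decidable (Spec_indentation_width text out) := by unfold Spec_indentation_width; infer_instance

-- ===== CLAIM (what is proved, stated in full; the proofs are below) =====
def Claim_equal_indentation_width : Prop := ∀ (text : String), Dom_indentation_width text → Spec_indentation_width text (indentation_width text)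

-- ===== LEMMAS AND PROOFS =====

-- the slice take (len - len (dropWhile p l)) l is exactly takeWhile p l
theorem take_sub_dropWhile {α : Type} (p : α → Bool) (l : List α) :
    l.take (l.length - (l.dropWhile p).length) = l.takeWhile p := by
  have hsum : (l.takeWhile p).length + (l.dropWhile p).length = l.length := by
    rw [← List.length_append, List.takeWhile_append_dropWhile]
  have h : l.length - (l.dropWhile p).length = (l.takeWhile p).length := by omega
  rw [h]
  exact (List.prefix_iff_eq_take.mp (List.takeWhile_prefix p)).symm

theorem widthLoopA_eq (l : List Char) :
    widthLoopA l =
      ((l.takeWhile (fun c => decide (c = ' ' ∨ c = '\t'))).count ' ' : Int)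
        + 4 * ((l.takeWhile (fun c => decide (c = ' ' ∨ c = '\t'))).count '\t' : Int) := by
  induction l with
  | nil => simp [widthLoopA]
  | cons c cs ih =>
    by_cases hs : c = ' '
    · subst hs
      simp [widthLoopA, ih]
      ring
    · by_cases ht : c = '\t'
      · subst ht
        simp [widthLoopA, ih]
        ring
      · simp [widthLoopA, hs, ht]

-- ===== VERDICT (by name: the statement is the Claim_ definition above) =====
theorem indentation_width_spec : Claim_equal_indentation_width := by
  intro text _
  unfold Spec_indentation_width indentation_width indentation_width_alt
  simp only []
  rw [take_sub_dropWhile, widthLoopA_eq]
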